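-- pv_equiv track=rewrite | github.com/Jyoti7890/Customer_Churn_Project | utils/data_loader.py | _resolve_git_conflicts
-- ===== SOURCE A (Python) =====
-- def _resolve_git_conflicts(lines):
--     """
--     Resolve plain-text Git conflict blocks by keeping the current branch
--     section (`HEAD`) and discarding the incoming branch section.
--     """
--     resolved = []
--     i = 0
--     had_conflict = False
--
--     while i < len(lines):
--         line = lines[i]
--
--         if line.startswith("<<<<<<<"):
--             had_conflict = True
--             i += 1
--
--             ours = []
--             while i < len(lines) and not lines[i].startswith("======="):
--                 ours.append(lines[i])
--                 i += 1
--
--             if i < len(lines) and lines[i].startswith("======="):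
--                 i += 1
--
--             while i < len(lines) and not lines[i].startswith(">>>>>>>"):
--                 i += 1
--
--             if i < len(lines) and lines[i].startswith(">>>>>>>"):
--                 i += 1
--
--             resolved.extend(ours)
--             continue
--
--         resolved.append(line)
--         i += 1
--
--     return resolved, had_conflict
-- ===== SOURCE B (Python) =====
-- def _resolve_git_conflicts(lines):
--     """Single pass driven by a 3-state machine: NORMAL / OURS / THEIRS."""
--     NORMAL, OURS, THEIRS = 0, 1, 2
--     state = NORMAL
--     resolved = []
--     had_conflict = False
--     for line in lines:
--         if state == NORMAL:
--             if line.startswith("<<<<<<<"):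
--                 had_conflict = True
--                 state = OURS
--             else:
--                 resolved.append(line)
--         elif state == OURS:
--             if line.startswith("======="):
--                 state = THEIRS
--             else:
--                 resolved.append(line)
--         else:  # THEIRS
--             if line.startswith(">>>>>>>"):
--                 state = NORMAL
--     return resolved, had_conflict
-- ===== Notes on version B (the rewrite author's own statement) =====
-- stated objective: simpler
-- what changed: Replaces the index-driven outer while loop with three nested inner scans by a single for-loop over the lines driven by an explicit three-state machine (NORMAL/OURS/THEIRS), appending kept lines immediately instead of buffering an 'ours' list and extending afterwards.
import Mathlib
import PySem

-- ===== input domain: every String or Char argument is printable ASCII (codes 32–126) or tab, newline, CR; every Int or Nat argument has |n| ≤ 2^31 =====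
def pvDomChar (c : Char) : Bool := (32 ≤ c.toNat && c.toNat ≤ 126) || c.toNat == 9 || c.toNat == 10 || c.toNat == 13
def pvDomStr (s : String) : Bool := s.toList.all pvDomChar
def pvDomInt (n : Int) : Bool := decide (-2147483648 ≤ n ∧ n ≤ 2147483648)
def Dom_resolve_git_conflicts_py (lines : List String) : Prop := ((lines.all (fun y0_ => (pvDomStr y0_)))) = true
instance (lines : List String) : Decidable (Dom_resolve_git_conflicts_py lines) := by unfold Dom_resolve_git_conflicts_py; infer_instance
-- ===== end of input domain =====

-- B replaces A's nested scanning loops by one pass with an explicit 3-state machine (simpler decomposition, same O(n) cost).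


-- ===== PORT A =====
-- inner loop 1: 'while i < len and not lines[i].startswith("=======")': collect ours, return (ours, rest)
def pvCollectOurs (rest : List String) : List String × List String :=
  match rest with
  | [] => ([], [])
  | l :: ls =>
    if PySem.Str.startswith l "=======" then ([], l :: ls)
    else
      let p := pvCollectOurs ls
      (l :: p.1, p.2)

-- 'if i < len and lines[i].startswith("=======")': i += 1
def pvSkipEq (rest : List String) : List String :=
  match rest with
  | [] => []
  | l :: ls => if PySem.Str.startswith l "=======" then ls else l :: ls

-- inner loop 2: 'while i < len and not lines[i].startswith(">>>>>>>")': i += 1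
def pvSkipTheirs (rest : List String) : List String :=
  match rest with
  | [] => []
  | l :: ls => if PySem.Str.startswith l ">>>>>>>" then l :: ls else pvSkipTheirs ls

-- 'if i < len and lines[i].startswith(">>>>>>>")': i += 1
def pvSkipEnd (rest : List String) : List String :=
  match rest with
  | [] => []
  | l :: ls => if PySem.Str.startswith l ">>>>>>>" then ls else l :: ls

theorem pvCollectOurs_len (rest : List String) : (pvCollectOurs rest).2.length ≤ rest.length := by
  induction rest with
  | nil => simp [pvCollectOurs]
  | cons l ls ih => simp only [pvCollectOurs]; split <;> simp <;> omega

theorem pvSkipEq_len (rest : List String) : (pvSkipEq rest).length ≤ rest.length := by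
  cases rest with
  | nil => simp [pvSkipEq]
  | cons l ls => simp only [pvSkipEq]; split <;> simp

theorem pvSkipTheirs_len (rest : List String) : (pvSkipTheirs rest).length ≤ rest.length := by
  induction rest with
  | nil => simp [pvSkipTheirs]
  | cons l ls ih => simp only [pvSkipTheirs]; split <;> simp <;> omega

theorem pvSkipEnd_len (rest : List String) : (pvSkipEnd rest).length ≤ rest.length := by
  cases rest with
  | nil => simp [pvSkipEnd]
  | cons l ls => simp only [pvSkipEnd]; split <;> simp

-- outer 'while i < len(lines)' loop of A, as recursion on the remaining suffix
def pvGoA (lines : List String) : List String × Bool :=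
  match lines with
  | [] => ([], false)
  | l :: ls =>
    if PySem.Str.startswith l "<<<<<<<" then
      -- had_conflict = True; collect ours; skip '======='; skip theirs; skip '>>>>>>>'; resolved.extend(ours)
      let p := pvCollectOurs ls
      let rest := pvSkipEnd (pvSkipTheirs (pvSkipEq p.2))
      (p.1 ++ (pvGoA rest).1, true)
    else
      let q := pvGoA ls
      (l :: q.1, q.2)
termination_by lines.length
decreasing_by
  · have h1 := pvCollectOurs_len ls
    have h2 := pvSkipEq_len (pvCollectOurs ls).2
    have h3 := pvSkipTheirs_len (pvSkipEq (pvCollectOurs ls).2)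
    have h4 := pvSkipEnd_len (pvSkipTheirs (pvSkipEq (pvCollectOurs ls).2))
    simp; omega
  · simp

def resolve_git_conflicts_py (lines : List String) : List String × Bool := pvGoA lines

-- ===== PORT B =====
-- state: 0 = NORMAL, 1 = OURS, 2 = THEIRS; accumulator (resolved, had_conflict, state)
def pvStepB (acc : List String × Bool × Nat) (line : String) : List String × Bool × Nat :=
  match acc with
  | (resolved, had, state) =>
    if state = 0 then
      if PySem.Str.startswith line "<<<<<<<" then (resolved, true, 1)
      else (resolved ++ [line], had, 0)
    else if state = 1 then
      if PySem.Str.startswith line "=======" then (resolved, had, 2)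
      else (resolved ++ [line], had, 1)
    else
      if PySem.Str.startswith line ">>>>>>>" then (resolved, had, 0)
      else (resolved, had, 2)

def resolve_git_conflicts_py_alt (lines : List String) : List String × Bool :=
  let r := lines.foldl pvStepB ([], false, 0)
  (r.1, r.2.1)

-- ===== PRECONDITION & SPEC =====
def Spec_resolve_git_conflicts_py (lines : List String) (out : List String × Bool) : Prop := out = resolve_git_conflicts_py_alt lines
instance (lines : List String) (out : List String × Bool) : Decidable (Spec_resolve_git_conflicts_py lines out) := by unfold Spec_resolve_git_conflicts_py; infer_instance

-- ===== CLAIM (what is proved, stated in full; the proofs are below) =====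
def Claim_equal_resolve_git_conflicts_py : Prop := ∀ (lines : List String), Dom_resolve_git_conflicts_py lines → Spec_resolve_git_conflicts_py lines (resolve_git_conflicts_py lines)

-- ===== LEMMAS AND PROOFS =====

-- projection to the observable part of B's accumulator (drops the machine state)
def pvOut (t : List String × Bool × Nat) : List String × Bool := (t.1, t.2.1)

-- state 2 of B consumes exactly what A's 'skip theirs' phase drops
theorem foldB_state2 (ls : List String) (res : List String) (had : Bool) :
    pvOut (ls.foldl pvStepB (res, had, 2)) = pvOut ((pvSkipEnd (pvSkipTheirs ls)).foldl pvStepB (res, had, 0)) := by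
  induction ls with
  | nil => simp [pvSkipTheirs, pvSkipEnd, pvOut]
  | cons l ls ih =>
    by_cases h : PySem.Str.startswith l ">>>>>>>" = true
    · simp at h; simp [pvStepB, pvSkipTheirs, pvSkipEnd, h]
    · simp at h; simp [pvStepB, pvSkipTheirs, h, ih]

-- state 1 of B appends exactly A's 'ours' buffer, then behaves as state 2 on the rest
theorem foldB_state1 (ls : List String) (res : List String) (had : Bool) :
    pvOut (ls.foldl pvStepB (res, had, 1)) =
      pvOut ((pvSkipEq (pvCollectOurs ls).2).foldl pvStepB (res ++ (pvCollectOurs ls).1, had, 2)) := by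
  induction ls generalizing res with
  | nil => simp [pvCollectOurs, pvSkipEq, pvOut]
  | cons l ls ih =>
    by_cases h : PySem.Str.startswith l "=======" = true
    · simp at h; simp [pvStepB, pvCollectOurs, pvSkipEq, h]
    · simp at h; simp [pvStepB, pvCollectOurs, pvSkipEq, h, ih]

-- main invariant: B's fold from NORMAL computes A's outer loop (with accumulated resolved/had)
theorem foldB_state0 (n : Nat) : ∀ (ls : List String), ls.length ≤ n → ∀ (res : List String) (had : Bool),
    pvOut (ls.foldl pvStepB (res, had, 0)) = (res ++ (pvGoA ls).1, had || (pvGoA ls).2) := by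
  induction n with
  | zero =>
    intro ls hl res had
    have : ls = [] := List.length_eq_zero_iff.mp (Nat.le_zero.mp hl)
    subst this; simp [pvGoA, pvOut]
  | succ n ih =>
    intro ls hl res had
    cases ls with
    | nil => simp [pvGoA, pvOut]
    | cons l ls =>
      simp at hl
      by_cases h : PySem.Str.startswith l "<<<<<<<" = true
      · have hrest : (pvSkipEnd (pvSkipTheirs (pvSkipEq (pvCollectOurs ls).2))).length ≤ n := by
          have h1 := pvCollectOurs_len ls
          have h2 := pvSkipEq_len (pvCollectOurs ls).2
          have h3 := pvSkipTheirs_len (pvSkipEq (pvCollectOurs ls).2)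
          have h4 := pvSkipEnd_len (pvSkipTheirs (pvSkipEq (pvCollectOurs ls).2))
          omega
        have hrec := ih _ hrest (res ++ (pvCollectOurs ls).1) true
        simp at h
        rw [pvGoA]
        simp [pvStepB, h, foldB_state1, foldB_state2, hrec]
      · have hrec := ih ls hl (res ++ [l]) had
        simp at h
        rw [pvGoA]
        simp [pvStepB, h, hrec]

-- ===== VERDICT (by name: the statement is the Claim_ definition above) =====
theorem resolve_git_conflicts_py_spec : Claim_equal_resolve_git_conflicts_py := by
  intro lines _
  show resolve_git_conflicts_py lines = resolve_git_conflicts_py_alt lines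
  have h := foldB_state0 lines.length lines (Nat.le_refl _) [] false
  unfold resolve_git_conflicts_py resolve_git_conflicts_py_alt
  have : (lines.foldl pvStepB ([], false, 0)).1 = (pvOut (lines.foldl pvStepB ([], false, 0))).1 := rfl
  simpa [pvOut] using h.symm
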